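-- pv_equiv track=rewrite | github.com/ORION2809/XAI_Tachycardia- | src/data/loaders/chapman.py | _extract_rhythm_labels
-- ===== SOURCE A (Python) =====
-- from typing import Dict, List, Optional, Tuple, Any
--
-- CHAPMAN_RHYTHM_MAP = {
--     # Supraventricular tachycardia
--     'SVT': 'SVT',
--     'AVNRT': 'SVT',
--     'AVRT': 'SVT',
--     'AT': 'SVT',           # Atrial tachycardia
--
--     # Atrial fibrillation/flutter
--     'AF': 'AFIB_RVR',
--     'AFIB': 'AFIB_RVR',
--     'AFL': 'AFLUTTER',
--     'AFLT': 'AFLUTTER',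
--
--     # Sinus rhythms
--     'STACH': 'SINUS_TACHY',
--     'ST': 'SINUS_TACHY',    # Sinus tachycardia
--     'SR': 'NORMAL',         # Sinus rhythm
--     'SB': 'NORMAL',         # Sinus bradycardia
--     'NSR': 'NORMAL',        # Normal sinus rhythm
--
--     # Others (not tachycardia-related)
--     'SA': 'NORMAL',         # Sinus arrhythmia
--     'PAC': 'NORMAL',        # Premature atrial contraction (isolated)
--     'PVC': 'NORMAL',        # Premature ventricular contraction (isolated)
-- }
--
-- def _extract_rhythm_labels(label_str: str) -> Tuple[List[str], List[str]]:
--     """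
--     Extract rhythm labels from diagnostic string.
--
--     Returns:
--         (raw_labels, canonical_rhythms)
--     """
--     raw_labels = []
--     canonical = []
--
--     if not label_str or not isinstance(label_str, str):
--         return raw_labels, canonical
--
--     # Labels may be comma-separated or semi-colon separated
--     parts = label_str.replace(';', ',').split(',')
--
--     for part in parts:
--         label = part.strip().upper()
--         if label:
--             raw_labels.append(label)
--             if label in CHAPMAN_RHYTHM_MAP:
--                 canonical.append(CHAPMAN_RHYTHM_MAP[label])
--
--     return raw_labels, canonical
-- ===== SOURCE B (Python) =====
-- CHAPMAN_RHYTHM_MAP = {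
--     'SVT': 'SVT', 'AVNRT': 'SVT', 'AVRT': 'SVT', 'AT': 'SVT',
--     'AF': 'AFIB_RVR', 'AFIB': 'AFIB_RVR', 'AFL': 'AFLUTTER', 'AFLT': 'AFLUTTER',
--     'STACH': 'SINUS_TACHY', 'ST': 'SINUS_TACHY',
--     'SR': 'NORMAL', 'SB': 'NORMAL', 'NSR': 'NORMAL',
--     'SA': 'NORMAL', 'PAC': 'NORMAL', 'PVC': 'NORMAL',
-- }
--
-- def _extract_rhythm_labels(label_str):
--     # Character-level scanner: one pass over the characters, cutting tokens at
--     # ',' / ';' with an explicit buffer, instead of replace().split().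
--     if not label_str or not isinstance(label_str, str):
--         return [], []
--     raw_labels = []
--     buf = []
--     for ch in label_str:
--         if ch == ',' or ch == ';':
--             token = ''.join(buf).strip().upper()
--             if token:
--                 raw_labels.append(token)
--             buf = []
--         else:
--             buf.append(ch)
--     token = ''.join(buf).strip().upper()
--     if token:
--         raw_labels.append(token)
--     canonical = [CHAPMAN_RHYTHM_MAP[t] for t in raw_labels if t in CHAPMAN_RHYTHM_MAP]
--     return raw_labels, canonical
-- ===== Notes on version B (the rewrite author's own statement) =====
-- stated objective: alternative
-- what changed: Replaces A's replace(';',',').split(',') string-library pipeline by a single character-level scanner with an explicit buffer that cuts tokens at ',' or ';' directly, flushing once after the loop; canonical is then a separate pass over raw_labels.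
import Mathlib
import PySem

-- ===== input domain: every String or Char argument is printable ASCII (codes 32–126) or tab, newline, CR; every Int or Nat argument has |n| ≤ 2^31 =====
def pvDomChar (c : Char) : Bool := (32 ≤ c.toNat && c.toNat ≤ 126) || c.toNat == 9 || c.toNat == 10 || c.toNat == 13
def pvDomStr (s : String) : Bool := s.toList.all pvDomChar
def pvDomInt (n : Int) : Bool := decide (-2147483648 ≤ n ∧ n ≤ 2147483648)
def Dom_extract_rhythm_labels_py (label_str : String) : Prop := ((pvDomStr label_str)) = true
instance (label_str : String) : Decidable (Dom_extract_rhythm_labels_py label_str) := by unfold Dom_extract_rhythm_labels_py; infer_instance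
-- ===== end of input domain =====

-- B replaces A's replace/split string-library pipeline by a character-level
-- scanner with an explicit token buffer; same return value (objective: alternative).

-- CHAPMAN_RHYTHM_MAP, shared module-level constant
def chapmanMap : PySem.Dict String String := PySem.Dict.ofList
  [("SVT", "SVT"), ("AVNRT", "SVT"), ("AVRT", "SVT"), ("AT", "SVT"),
   ("AF", "AFIB_RVR"), ("AFIB", "AFIB_RVR"), ("AFL", "AFLUTTER"), ("AFLT", "AFLUTTER"),
   ("STACH", "SINUS_TACHY"), ("ST", "SINUS_TACHY"),
   ("SR", "NORMAL"), ("SB", "NORMAL"), ("NSR", "NORMAL"),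
   ("SA", "NORMAL"), ("PAC", "NORMAL"), ("PVC", "NORMAL")]

-- ===== PORT A =====
-- loop body of A's single for-loop (strip/upper, append to raw, conditional dict lookup)
def chapmanStepA (acc : List String × List String) (part : String) : List String × List String :=
  let label := PySem.Str.upper (PySem.Str.strip part)
  if label ≠ "" then
    (acc.1 ++ [label],
     if chapmanMap.contains label then acc.2 ++ [(chapmanMap.get? label).getD ""] else acc.2)
  else acc

def extract_rhythm_labels_py (label_str : String) : List String × List String :=
  if label_str = "" then ([], [])
  else
    -- label_str.replace(';', ',').split(','): sep "," ≠ "" so split? is always some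
    let parts := (PySem.Str.split? (PySem.Str.replace label_str ";" ",") ",").getD []
    parts.foldl chapmanStepA ([], [])

-- ===== PORT B =====
-- B's loop body: cut the token at ',' / ';', else extend the buffer
def chapmanScanStep (st : List String × List Char) (ch : Char) : List String × List Char :=
  if ch = ',' ∨ ch = ';' then
    let token := PySem.Str.upper (PySem.Str.strip (String.ofList st.2))
    (if token ≠ "" then st.1 ++ [token] else st.1, [])
  else (st.1, st.2 ++ [ch])

def extract_rhythm_labels_py_alt (label_str : String) : List String × List String :=
  if label_str = "" then ([], [])
  else
    let st := label_str.toList.foldl chapmanScanStep ([], [])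
    let token := PySem.Str.upper (PySem.Str.strip (String.ofList st.2))
    let raw_labels := if token ≠ "" then st.1 ++ [token] else st.1
    let canonical := raw_labels.filterMap (fun t => chapmanMap.get? t)
    (raw_labels, canonical)

-- ===== PRECONDITION & SPEC =====
def Spec_extract_rhythm_labels_py (label_str : String) (out : List String × List String) : Prop := out = extract_rhythm_labels_py_alt label_str
instance (label_str : String) (out : List String × List String) : Decidable (Spec_extract_rhythm_labels_py label_str out) := by unfold Spec_extract_rhythm_labels_py; infer_instance

-- ===== CLAIM (what is proved, stated in full; the proofs are below) =====
def Claim_equal_extract_rhythm_labels_py : Prop := ∀ (label_str : String), Dom_extract_rhythm_labels_py label_str → Spec_extract_rhythm_labels_py label_str (extract_rhythm_labels_py label_str)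

-- ===== LEMMAS AND PROOFS =====

-- Simple single-char splitter, the common reference both ports are reduced to
def charSplit : List Char → List (List Char)
  | [] => [[]]
  | c :: t => if c = ',' ∨ c = ';' then [] :: charSplit t else (charSplit t).modifyHead (c :: ·)

-- token produced from one part (strip, upper, drop if empty)
def finTok (p : List Char) : List String :=
  let t := PySem.Str.upper (PySem.Str.strip (String.ofList p))
  if t ≠ "" then [t] else []

-- Chars.replace with single-char old/new is a map over the characters
theorem replace_semi_eq_map (l : List Char) (fuel : Nat) (acc : List Char)
    (h : l.length ≤ fuel) :
    PySem.Chars.replace.go [';'] [','] fuel l acc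
      = acc.reverse ++ l.map (fun c => if c = ';' then ',' else c) := by
  induction l generalizing fuel acc with
  | nil => cases fuel <;> simp [PySem.Chars.replace.go]
  | cons c t ih =>
    cases fuel with
    | zero => simp at h
    | succ f =>
      simp only [PySem.Chars.replace.go]
      by_cases hc : c = ';'
      · rw [if_pos (by simp [hc, List.isPrefixOf])]
        simp only [List.length_cons, List.length_nil, List.drop_succ_cons, List.drop_zero]
        rw [ih f _ (by simpa using Nat.le_of_succ_le_succ h)]
        simp [hc]
      · rw [if_neg (by simp [List.isPrefixOf]; intro h'; exact hc h'.symm)]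
        rw [ih f _ (by simpa using Nat.le_of_succ_le_succ h)]
        simp [hc]

theorem modifyHead_fun_id (l : List (List Char)) : List.modifyHead (fun x => x) l = l := by
  cases l <;> simp

-- splitOn with single-char sep "," is charSplit of the comma-only string
theorem splitOn_go_comma (l : List Char) (fuel : Nat) (cur : List Char) (acc : List (List Char))
    (h : l.length ≤ fuel)
    (hl : ∀ c ∈ l, c ≠ ';') :
    PySem.Chars.splitOn.go [','] fuel l cur acc
      = acc.reverse ++ (charSplit l).modifyHead (cur.reverse ++ ·) := by
  induction l generalizing fuel cur acc with
  | nil => cases fuel <;> simp [PySem.Chars.splitOn.go, charSplit]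
  | cons c t ih =>
    cases fuel with
    | zero => simp at h
    | succ f =>
      simp only [PySem.Chars.splitOn.go]
      by_cases hc : c = ','
      · rw [if_pos (by simp [hc, List.isPrefixOf])]
        simp only [List.length_cons, List.length_nil, List.drop_succ_cons, List.drop_zero]
        rw [ih f _ _ (by simpa using Nat.le_of_succ_le_succ h) (fun x hx => hl x (by simp [hx]))]
        simp [charSplit, hc, modifyHead_fun_id]
      · rw [if_neg (by simp [List.isPrefixOf]; intro h'; exact hc h'.symm)]
        rw [ih f _ _ (by simpa using Nat.le_of_succ_le_succ h) (fun x hx => hl x (by simp [hx]))]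
        have hcs : c ≠ ';' := hl c (by simp)
        simp only [charSplit, hc, hcs, or_self, if_false]
        rw [List.modifyHead_modifyHead]
        cases charSplit t <;> simp

-- charSplit ignores the ';'→',' replacement (both are separators)
theorem charSplit_map_r (l : List Char) :
    charSplit (l.map (fun c => if c = ';' then ',' else c)) = charSplit l := by
  induction l with
  | nil => rfl
  | cons c t ih => by_cases h1 : c = ';' <;> by_cases h2 : c = ',' <;> simp [charSplit, h1, h2, ih]

-- A's parts are exactly charSplit of the original characters
theorem parts_eq_charSplit (s : String) :
    (PySem.Str.split? (PySem.Str.replace s ";" ",") ",").getD []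
      = (charSplit s.toList).map String.ofList := by
  have hrep : (PySem.Str.replace s ";" ",").toList
      = s.toList.map (fun c => if c = ';' then ',' else c) := by
    rw [PySem.Str.toList_replace]
    show PySem.Chars.replace s.toList [';'] [','] = _
    rw [PySem.Chars.replace]
    simp only [List.isEmpty_cons, Bool.false_eq_true, if_false]
    rw [replace_semi_eq_map s.toList s.toList.length [] (le_refl _)]
    simp
  rw [PySem.Str.split?]
  show ((PySem.Chars.split? (PySem.Str.replace s ";" ",").toList [',']).map
      (List.map String.ofList)).getD [] = _
  rw [hrep, PySem.Chars.split?]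
  simp only [List.isEmpty_cons, Bool.false_eq_true, if_false, Option.map_some, Option.getD_some]
  rw [PySem.Chars.splitOn,
      splitOn_go_comma _ _ _ _ (by simp)
        (by intro c hc; rcases List.mem_map.mp hc with ⟨x, _, hx⟩; subst hx; split <;> simp_all)]
  simp [modifyHead_fun_id, charSplit_map_r]

-- tokens of a list of parts
def tokensOf (ps : List (List Char)) : List String := ps.flatMap finTok

-- A's fold over parts, started at (r, c), appends the tokens and their lookups
theorem chapman_foldA_eq (parts : List (List Char)) (r c : List String) :
    ((parts.map String.ofList).foldl chapmanStepA (r, c))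
    = (r ++ tokensOf parts,
       c ++ (tokensOf parts).filterMap (fun t => chapmanMap.get? t)) := by
  induction parts generalizing r c with
  | nil => simp [tokensOf]
  | cons p rest ih =>
    rw [List.map_cons, List.foldl_cons]
    by_cases hne : PySem.Str.upper (PySem.Str.strip (String.ofList p)) = ""
    · rw [show chapmanStepA (r, c) (String.ofList p) = (r, c) by simp [chapmanStepA, hne], ih]
      simp [tokensOf, finTok, hne]
    · cases hv : chapmanMap.get? (PySem.Str.upper (PySem.Str.strip (String.ofList p))) with
      | none =>
        have hcon : chapmanMap.contains (PySem.Str.upper (PySem.Str.strip (String.ofList p))) = false := by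
          simp [PySem.Dict.contains_eq_isSome_get?, hv]
        rw [show chapmanStepA (r, c) (String.ofList p)
              = (r ++ [PySem.Str.upper (PySem.Str.strip (String.ofList p))], c) by
              simp [chapmanStepA, hne, hcon], ih]
        simp [tokensOf, finTok, hne, hv]
      | some v =>
        have hcon : chapmanMap.contains (PySem.Str.upper (PySem.Str.strip (String.ofList p))) = true := by
          simp [PySem.Dict.contains_eq_isSome_get?, hv]
        rw [show chapmanStepA (r, c) (String.ofList p)
              = (r ++ [PySem.Str.upper (PySem.Str.strip (String.ofList p))], c ++ [v]) by
              simp [chapmanStepA, hne, hcon, hv], ih]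
        simp [tokensOf, finTok, hne, hv]

-- B's scanner with a flush equals the tokens of charSplit
theorem scan_eq_tokens (l : List Char) (raw : List String) (buf : List Char) :
    (l.foldl chapmanScanStep (raw, buf)).1
        ++ finTok (l.foldl chapmanScanStep (raw, buf)).2
      = raw ++ tokensOf ((charSplit l).modifyHead (buf ++ ·)) := by
  induction l generalizing raw buf with
  | nil => simp [charSplit, tokensOf]
  | cons ch t ih =>
    by_cases hc : ch = ',' ∨ ch = ';'
    · rw [List.foldl_cons,
          show chapmanScanStep (raw, buf) ch = (raw ++ finTok buf, []) by
            simp only [chapmanScanStep, if_pos hc, finTok]; split <;> simp_all,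
          ih]
      simp [charSplit, hc, tokensOf, modifyHead_fun_id]
    · rw [List.foldl_cons,
          show chapmanScanStep (raw, buf) ch = (raw, buf ++ [ch]) by
            simp [chapmanScanStep, hc],
          ih]
      rw [show charSplit (ch :: t) = (charSplit t).modifyHead (ch :: ·) by
            simp [charSplit, hc]]
      rw [List.modifyHead_modifyHead]
      cases charSplit t <;> simp

-- ===== VERDICT (by name: the statement is the Claim_ definition above) =====
theorem extract_rhythm_labels_py_spec : Claim_equal_extract_rhythm_labels_py := by
  intro s _
  unfold Spec_extract_rhythm_labels_py extract_rhythm_labels_py extract_rhythm_labels_py_alt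
  by_cases h : s = ""
  · simp [h]
  · simp only [h, if_false]
    rw [parts_eq_charSplit, chapman_foldA_eq]
    have hb := scan_eq_tokens s.toList [] []
    simp only [List.nil_append, modifyHead_fun_id] at hb
    rcases hfold : s.toList.foldl chapmanScanStep ([], []) with ⟨r, b⟩
    rw [hfold] at hb
    by_cases ht : PySem.Str.upper (PySem.Str.strip (String.ofList b)) = ""
    · simp only [finTok, ht, ne_eq, not_true_eq_false, if_false, List.append_nil] at hb ⊢
      simp [← hb]
    · simp only [finTok, ht, ne_eq, not_false_eq_true, if_true] at hb ⊢
      simp [← hb]
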